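-- pv_equiv track=rewrite | github.com/emifrn/edgar-pipes | edgar/cli/build.py | resolve_group_dependencies
-- ===== SOURCE A (Python) =====
-- def resolve_group_dependencies(groups_config: dict, requested_groups: list[str]) -> set[str]:
--     """
--     Resolve group dependencies by recursively including parent groups.
--
--     Args:
--         groups_config: Groups section from ep.toml
--         requested_groups: List of group names requested by user
--
--     Returns:
--         Set of all groups including dependencies
--     """
--     result = set()
--
--     def add_with_parents(group_name: str):
--         if group_name in result:
--             return  # Already processed
--
--         result.add(group_name)
--
--         # Check if this group has a parent
--         group_spec = groups_config.get(group_name, {})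
--         parent_name = group_spec.get("from")
--
--         if parent_name:
--             # Recursively add parent and its dependencies
--             add_with_parents(parent_name)
--
--     for group_name in requested_groups:
--         add_with_parents(group_name)
--
--     return result
-- ===== SOURCE B (Python) =====
-- def resolve_group_dependencies(groups_config: dict, requested_groups: list[str]) -> set[str]:
--     """Two-stage iterative version: first flatten the config into a plain
--     name -> parent map in one pass, then walk each requested group's ancestry
--     with a while loop, recording first visits in an insertion-ordered dict
--     (the 'current not in seen' guard keeps the walk duplicate-free and
--     cycle-safe, with O(1) membership)."""
--     parent_of = {}
--     for name, spec in groups_config.items():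
--         parent_of[name] = spec.get("from")
--     seen = {}
--     for name in requested_groups:
--         current = name
--         while current not in seen:
--             seen[current] = True
--             parent = parent_of.get(current)
--             if not parent:
--                 break
--             current = parent
--     return set(seen)
-- ===== Notes on version B (the rewrite author's own statement) =====
-- stated objective: simpler
-- what changed: Replaces the closure-based recursive helper mutating a shared set by a two-stage iterative version: one pass flattens the config into a name->parent map, then a plain while loop walks each requested group's ancestry, recording first visits in an insertion-ordered dict used as a visited set; Pre_ restricts the association-list encoding to lists with pairwise-distinct keys, the only lists that represent an actual Python dict (on duplicate keys A's first-match and B's last-wins map building would disagree, a situation the Python argument, being a dict, can never present).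
import Mathlib
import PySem

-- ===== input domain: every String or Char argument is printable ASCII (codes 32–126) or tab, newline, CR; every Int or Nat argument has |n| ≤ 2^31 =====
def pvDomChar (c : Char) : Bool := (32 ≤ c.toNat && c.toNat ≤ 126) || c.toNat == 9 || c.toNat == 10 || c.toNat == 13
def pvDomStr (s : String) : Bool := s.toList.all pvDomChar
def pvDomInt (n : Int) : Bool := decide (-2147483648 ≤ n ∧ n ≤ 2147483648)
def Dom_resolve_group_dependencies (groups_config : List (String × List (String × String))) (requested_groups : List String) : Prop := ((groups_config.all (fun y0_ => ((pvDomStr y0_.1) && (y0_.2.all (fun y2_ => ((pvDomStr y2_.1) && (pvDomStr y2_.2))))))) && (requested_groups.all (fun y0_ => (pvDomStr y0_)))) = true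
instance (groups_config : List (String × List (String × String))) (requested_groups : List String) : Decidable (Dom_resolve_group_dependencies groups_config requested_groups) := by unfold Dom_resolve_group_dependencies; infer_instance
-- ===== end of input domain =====

-- B replaces A's closure-based recursive helper (shared mutable set) by a two-stage iterative
-- version: one pass flattens the config into a name->parent map, then a plain while loop walks
-- each requested group's ancestry appending first visits to a seen list (objective: simpler).

-- ===== PORT A =====
-- groups_config.get(group_name, {}).get("from"), with Python-falsy (None or "") collapsed to ""
def pvParent (groups_config : List (String × List (String × String))) (g : String) : String :=
  ((PySem.Dict.mk (((PySem.Dict.mk groups_config).get? g).getD [])).get? "from").getD ""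

-- add_with_parents: recursion on fuel; fuel groups_config.length + 2 always exceeds the walk's
-- length (distinct names visited: the start plus distinct nonempty "from" values), so the fuel
-- guard only makes the same computation total (the Python recursion stops by the same two tests)
def addWithParents (groups_config : List (String × List (String × String))) :
    Nat → String → PySem.Set String → PySem.Set String
  | 0, _, result => result
  | fuel+1, group_name, result =>
    if PySem.Set.contains result group_name then result
    else
      let result := PySem.Set.add result group_name
      let parent_name := pvParent groups_config group_name
      if parent_name ≠ "" then addWithParents groups_config fuel parent_name result
      else result

def resolve_group_dependencies (groups_config : List (String × List (String × String))) (requested_groups : List String) : List String :=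
  requested_groups.foldl
    (fun result group_name => addWithParents groups_config (groups_config.length + 2) group_name result)
    PySem.Set.empty

-- ===== PORT B =====
-- the first pass of Source B: parent_of[name] = spec.get("from"); Python's None is encoded as ""
-- (exact here: only falsiness and the non-empty string value are ever used downstream)
def buildParentOf (groups_config : List (String × List (String × String))) : PySem.Dict String String :=
  groups_config.foldl
    (fun d kv => d.insert kv.1 (((PySem.Dict.mk kv.2).get? "from").getD ""))
    PySem.Dict.empty

-- the while loop of Source B: 'while current not in seen: seen[current] = True;
-- parent = parent_of.get(current); if not parent: break; current = parent'; fuel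
-- groups_config.length + 2 exceeds the possible number of first visits (the start plus
-- distinct stored parent values), so it only totalises the loop
def walkUp (parent_of : PySem.Dict String String) : Nat → String → PySem.Dict String Bool → PySem.Dict String Bool
  | 0, _, seen => seen
  | fuel+1, current, seen =>
    if seen.contains current then seen
    else
      let seen2 := seen.insert current true
      let parent := parent_of.getD current ""
      if parent = "" then seen2
      else walkUp parent_of fuel parent seen2

-- the outer 'for name in requested_groups' loop of Source B, as structural recursion on the list
def walkAll (parent_of : PySem.Dict String String) (fuel : Nat) : List String → PySem.Dict String Bool → PySem.Dict String Bool
  | [], seen => seen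
  | name :: rest, seen => walkAll parent_of fuel rest (walkUp parent_of fuel name seen)

-- return set(seen): the distinct keys, in insertion order
def resolve_group_dependencies_alt (groups_config : List (String × List (String × String))) (requested_groups : List String) : List String :=
  PySem.Set.ofList ((walkAll (buildParentOf groups_config) (groups_config.length + 2) requested_groups PySem.Dict.empty).keys)

-- ===== PRECONDITION & SPEC =====
-- Pre_ restricts the association-list encoding of the dict argument to lists with pairwise-distinct
-- keys — the only lists that represent an actual Python dict (on duplicate keys A's first-match
-- lookup and B's last-wins map building would read different entries, a situation the Python
-- argument, being a dict, can never present).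
def Pre_resolve_group_dependencies (groups_config : List (String × List (String × String))) (requested_groups : List String) : Prop :=
  (groups_config.map Prod.fst).Nodup
instance (groups_config : List (String × List (String × String))) (requested_groups : List String) : Decidable (Pre_resolve_group_dependencies groups_config requested_groups) := by unfold Pre_resolve_group_dependencies; infer_instance

def pvWitness_resolve_group_dependencies : (List (String × List (String × String))) × List String :=
  ([("app", [("from", "base")]), ("base", [])], ["app"])

def Spec_resolve_group_dependencies (groups_config : List (String × List (String × String))) (requested_groups : List String) (out : List String) : Prop := out = resolve_group_dependencies_alt groups_config requested_groups
instance (groups_config : List (String × List (String × String))) (requested_groups : List String) (out : List String) : Decidable (Spec_resolve_group_dependencies groups_config requested_groups out) := by unfold Spec_resolve_group_dependencies; infer_instance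

-- ===== CLAIM (what is proved, stated in full; the proofs are below) =====
def Claim_equal_resolve_group_dependencies : Prop := ∀ (groups_config : List (String × List (String × String))) (requested_groups : List String), Dom_resolve_group_dependencies groups_config requested_groups → Pre_resolve_group_dependencies groups_config requested_groups → Spec_resolve_group_dependencies groups_config requested_groups (resolve_group_dependencies groups_config requested_groups)

-- ===== LEMMAS AND PROOFS =====

-- the value Source B stores for one config entry
def pvStored (spec : List (String × String)) : String :=
  ((PySem.Dict.mk spec).get? "from").getD ""

-- with pairwise-distinct keys, the one-pass map agrees with A's nested first-match lookup
theorem foldl_insert_getD (gc : List (String × List (String × String))) :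
    ∀ (d : PySem.Dict String String) (g : String),
      (gc.map Prod.fst).Nodup →
      (∀ kv ∈ gc, d.contains kv.1 = false) →
      (gc.foldl (fun d kv => d.insert kv.1 (((PySem.Dict.mk kv.2).get? "from").getD "")) d).getD g ""
        = (match (PySem.Dict.mk gc).get? g with
           | some spec => pvStored spec
           | none => d.getD g "") := by
  induction gc with
  | nil => intro d g _ _; rfl
  | cons kv t ih =>
    intro d g hnd hfresh
    obtain ⟨k, spec⟩ := kv
    have hnd' : (k :: t.map Prod.fst).Nodup := by rw [List.map_cons] at hnd; exact hnd
    have hk : k ∉ t.map Prod.fst := (List.nodup_cons.mp hnd').1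
    have hndt : (t.map Prod.fst).Nodup := (List.nodup_cons.mp hnd').2
    have hfresh' : ∀ kv' ∈ t, (d.insert k (pvStored spec)).contains kv'.1 = false := by
      intro kv' hmem
      rw [PySem.Dict.contains_insert]
      have h1 : (kv'.1 == k) = false := by
        have : kv'.1 ≠ k := by
          intro h
          exact hk (h ▸ List.mem_map.mpr ⟨kv', hmem, rfl⟩)
        simpa using this
      rw [h1, hfresh kv' (List.mem_cons_of_mem _ hmem)]
      rfl
    have hrec := ih (d.insert k (pvStored spec)) g hndt hfresh'
    simp only [List.foldl_cons]
    rw [show (((PySem.Dict.mk spec).get? "from").getD "") = pvStored spec from rfl, hrec]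
    rw [PySem.Dict.get?_mk_cons]
    by_cases hg : k = g
    · subst hg
      have hnone : (PySem.Dict.mk t).get? k = none := by
        rw [PySem.Dict.get?_eq_none_iff_not_mem_keys]
        simpa [PySem.Dict.keys] using hk
      simp [hnone, PySem.Dict.getD_insert_self]
    · have hbe : (k == g) = false := by simpa using hg
      rw [hbe]
      simp only [Bool.false_eq_true, if_false]
      cases h : (PySem.Dict.mk t).get? g with
      | some spec' => rfl
      | none =>
        simp only
        rw [PySem.Dict.getD_insert_of_ne d (pvStored spec) "" (Ne.symm hg)]

-- pvParent written through the match of the previous lemma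
theorem pvParent_match (gc : List (String × List (String × String))) (g : String) :
    pvParent gc g = (match (PySem.Dict.mk gc).get? g with
                     | some spec => pvStored spec
                     | none => "") := by
  unfold pvParent pvStored
  cases h : (PySem.Dict.mk gc).get? g with
  | none => simp only [h, Option.getD_none]; rfl
  | some spec => simp only [h, Option.getD_some]

-- the lookup Source B's walk performs equals A's lookup, under Pre_
theorem parentOf_eq (gc : List (String × List (String × String)))
    (hnd : (gc.map Prod.fst).Nodup) (g : String) :
    (buildParentOf gc).getD g "" = pvParent gc g := by
  unfold buildParentOf
  rw [foldl_insert_getD gc PySem.Dict.empty g hnd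
      (fun kv _ => PySem.Dict.contains_empty _), pvParent_match]
  cases h : (PySem.Dict.mk gc).get? g <;> rfl

-- B's while loop performs, on the KEYS of its visited dict, exactly the steps of A's
-- recursive helper (same fuel)
theorem walkUp_keys (gc : List (String × List (String × String)))
    (hnd : (gc.map Prod.fst).Nodup) :
    ∀ (f : Nat) (cur : String) (seen : PySem.Dict String Bool),
      (walkUp (buildParentOf gc) f cur seen).keys = addWithParents gc f cur seen.keys := by
  intro f
  induction f with
  | zero => intro cur seen; rfl
  | succ f ih =>
    intro cur seen
    have hpar := parentOf_eq gc hnd cur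
    by_cases hc : cur ∈ seen.keys
    · have h1 : seen.contains cur = true := (PySem.Dict.contains_iff_mem_keys _ _).mpr hc
      simp [walkUp, addWithParents, h1, hc]
    · have h1 : seen.contains cur = false := by
        cases h : seen.contains cur
        · rfl
        · exact absurd ((PySem.Dict.contains_iff_mem_keys _ _).mp h) hc
      have hkeys : (seen.insert cur true).keys = seen.keys ++ [cur] :=
        PySem.Dict.keys_insert_of_not_contains seen true h1
      by_cases hp : pvParent gc cur = ""
      · simp [walkUp, addWithParents, h1, hc, hkeys, hpar, hp]
      · simp [walkUp, addWithParents, h1, hc, hkeys, hpar, hp, ih]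

-- B's outer loop is, on the keys, A's fold over the requested groups
theorem walkAll_keys (gc : List (String × List (String × String)))
    (hnd : (gc.map Prod.fst).Nodup) (fuel : Nat) :
    ∀ (req : List String) (seen : PySem.Dict String Bool),
      (walkAll (buildParentOf gc) fuel req seen).keys
        = req.foldl (fun r g => addWithParents gc fuel g r) seen.keys := by
  intro req
  induction req with
  | nil => intro seen; rfl
  | cons n rest ih =>
    intro seen
    simp only [walkAll, List.foldl_cons, ih, walkUp_keys gc hnd]

-- A's helper keeps the result list duplicate-free
theorem addWithParents_nodup (gc : List (String × List (String × String))) :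
    ∀ (f : Nat) (cur : String) (res : List String), res.Nodup → (addWithParents gc f cur res).Nodup := by
  intro f
  induction f with
  | zero => intro cur res h; exact h
  | succ f ih =>
    intro cur res h
    by_cases hc : cur ∈ res
    · simpa [addWithParents, hc] using h
    · have hadd : PySem.Set.add res cur = res ++ [cur] := PySem.Set.add_of_not_mem hc
      have hap : (res ++ [cur]).Nodup := by
        simp only [List.nodup_append, List.nodup_singleton, true_and, h]
        intro a ha b hb
        simp only [List.mem_singleton] at hb
        exact fun h' => hc ((hb ▸ h') ▸ ha)
      by_cases hp : pvParent gc cur = ""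
      · simpa [addWithParents, hc, hadd, hp] using hap
      · simpa [addWithParents, hc, hadd, hp] using ih _ _ hap

theorem foldl_addWithParents_nodup (gc : List (String × List (String × String))) (fuel : Nat) :
    ∀ (req : List String) (res : List String), res.Nodup →
      (req.foldl (fun r g => addWithParents gc fuel g r) res).Nodup := by
  intro req
  induction req with
  | nil => intro res h; exact h
  | cons n rest ih =>
    intro res h
    exact ih _ (addWithParents_nodup gc fuel n res h)

-- ===== VERDICT (by name: the statement is the Claim_ definition above) =====
theorem resolve_group_dependencies_spec : Claim_equal_resolve_group_dependencies := by
  intro gc req _ hpre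
  unfold Spec_resolve_group_dependencies resolve_group_dependencies resolve_group_dependencies_alt
  rw [walkAll_keys gc hpre, show (PySem.Dict.empty : PySem.Dict String Bool).keys = [] from rfl]
  exact (PySem.Set.ofList_eq_self_of_nodup _
      (foldl_addWithParents_nodup gc (gc.length + 2) req [] List.nodup_nil)).symm
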